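-- pv_equiv track=rewrite | github.com/Z-Alos/qrCode | main.py | calculate_format_info
-- ===== SOURCE A (Python) =====
-- def calculate_format_info(data_bits_5bit):
--     generator = 0b10100110111  # 0x537
--     data_bits_5bit &= 0b11111  # Force only 5 bits
--     data = data_bits_5bit << 10  # Append 10 zero bits
--
--     # Do mod-2 division (XOR when MSB aligns)
--     for i in range(14, 9, -1):
--         if data & (1 << i):
--             data ^= generator << (i - 10)
--
--     bch_code = data
--     full_format_info = (data_bits_5bit << 10) | bch_code
--     masked = full_format_info ^ 0b101010000010010  # Format mask
--
--     return f"{masked:015b}"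
-- ===== SOURCE B (Python) =====
-- # The canonical QR format-information table (each entry = the BCH(15,5)
-- # code of its index, XORed with the standard format mask 0b101010000010010).
-- _FORMAT_TABLE = [
--     "101010000010010",
--     "101000100100101",
--     "101111001111100",
--     "101101101001011",
--     "100010111111001",
--     "100000011001110",
--     "100111110010111",
--     "100101010100000",
--     "111011111000100",
--     "111001011110011",
--     "111110110101010",
--     "111100010011101",
--     "110011000101111",
--     "110001100011000",
--     "110110001000001",
--     "110100101110110",
--     "001011010001001",
--     "001001110111110",
--     "001110011100111",
--     "001100111010000",
--     "000011101100010",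
--     "000001001010101",
--     "000110100001100",
--     "000100000111011",
--     "011010101011111",
--     "011000001101000",
--     "011111100110001",
--     "011101000000110",
--     "010010010110100",
--     "010000110000011",
--     "010111011011010",
--     "010101111101101"
-- ]
--
--
-- def calculate_format_info(data_bits_5bit):
--     return _FORMAT_TABLE[data_bits_5bit & 0b11111]
-- ===== Notes on version B (the rewrite author's own statement) =====
-- stated objective: idiomatic
-- what changed: Replaces the per-call BCH mod-2 polynomial-division loop with a single lookup in the canonical QR format-information table, indexed by the masked low bits.
import Mathlib
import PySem

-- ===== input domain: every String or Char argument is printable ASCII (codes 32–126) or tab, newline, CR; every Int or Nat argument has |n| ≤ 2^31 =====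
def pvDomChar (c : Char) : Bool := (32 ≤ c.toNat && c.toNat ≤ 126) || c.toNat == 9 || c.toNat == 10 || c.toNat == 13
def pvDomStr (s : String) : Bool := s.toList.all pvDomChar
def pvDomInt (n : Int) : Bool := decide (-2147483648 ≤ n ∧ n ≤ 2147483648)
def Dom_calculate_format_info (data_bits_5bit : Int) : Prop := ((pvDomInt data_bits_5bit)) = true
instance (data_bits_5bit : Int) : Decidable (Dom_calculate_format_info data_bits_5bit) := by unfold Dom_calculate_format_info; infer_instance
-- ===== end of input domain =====

-- B replaces A's per-call BCH polynomial-division loop by a lookup in the canonical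
-- canonical QR format-information table (objective: idiomatic; no speed claim).

-- ===== PORT A =====
-- f"{masked:015b}": binary digits zero-padded on the left to width 15 (exact for 0 ≤ n; masked is always ≥ 0 here)
def pvFmt015b (n : Int) : String :=
  let s := PySem.Int.toBin n
  String.ofList (List.replicate (15 - s.toList.length) '0' ++ s.toList)

def calculate_format_info (data_bits_5bit : Int) : String :=
  let generator : Int := 0b10100110111
  let data_bits_5bit := PySem.Int.band data_bits_5bit 0b11111
  let data := data_bits_5bit <<< 10
  -- for i in range(14, 9, -1): if data & (1 << i): data ^= generator << (i - 10)
  let data := (PySem.List.pyRange 14 9 (-1)).foldl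
    (fun data i =>
      if PySem.Int.band data ((1 : Int) <<< i.toNat) ≠ 0 then
        PySem.Int.bxor data (generator <<< (i - 10).toNat)
      else data) data
  let bch_code := data
  let full_format_info := PySem.Int.bor (data_bits_5bit <<< 10) bch_code
  let masked := PySem.Int.bxor full_format_info 0b101010000010010
  pvFmt015b masked

-- ===== PORT B =====
def pvFormatTable : List String :=
  [ "101010000010010",
  "101000100100101",
  "101111001111100",
  "101101101001011",
  "100010111111001",
  "100000011001110",
  "100111110010111",
  "100101010100000",
  "111011111000100",
  "111001011110011",
  "111110110101010",
  "111100010011101",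
  "110011000101111",
  "110001100011000",
  "110110001000001",
  "110100101110110",
  "001011010001001",
  "001001110111110",
  "001110011100111",
  "001100111010000",
  "000011101100010",
  "000001001010101",
  "000110100001100",
  "000100000111011",
  "011010101011111",
  "011000001101000",
  "011111100110001",
  "011101000000110",
  "010010010110100",
  "010000110000011",
  "010111011011010",
  "010101111101101" ]

def calculate_format_info_alt (data_bits_5bit : Int) : String :=
  pvFormatTable.getD (PySem.Int.band data_bits_5bit 0b11111).toNat ""

-- ===== PRECONDITION & SPEC =====
def Spec_calculate_format_info (data_bits_5bit : Int) (out : String) : Prop := out = calculate_format_info_alt data_bits_5bit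
instance (data_bits_5bit : Int) (out : String) : Decidable (Spec_calculate_format_info data_bits_5bit out) := by unfold Spec_calculate_format_info; infer_instance

-- ===== CLAIM (what is proved, stated in full; the proofs are below) =====
def Claim_equal_calculate_format_info : Prop := ∀ (data_bits_5bit : Int), Dom_calculate_format_info data_bits_5bit → Spec_calculate_format_info data_bits_5bit (calculate_format_info data_bits_5bit)

-- ===== LEMMAS AND PROOFS =====
theorem pv_band31_bounds (d : Int) :
    0 ≤ PySem.Int.band d 31 ∧ PySem.Int.band d 31 < 32 := by
  unfold PySem.Int.band
  split_ifs with h1 h2 h3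
  · have : d.toNat &&& Int.toNat 31 ≤ Int.toNat 31 := Nat.and_le_right
    omega
  · omega
  · have : Int.toNat 31 &&& (-d - 1).toNat ≤ Int.toNat 31 := Nat.and_le_left
    omega
  · omega

-- ===== VERDICT (by name: the statement is the Claim_ definition above) =====
theorem calculate_format_info_spec : Claim_equal_calculate_format_info := by
  intro d _
  unfold Spec_calculate_format_info calculate_format_info calculate_format_info_alt
  obtain ⟨h0, h1⟩ := pv_band31_bounds d
  generalize hm : PySem.Int.band d 31 = m at *
  interval_cases m <;> decide
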